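-- pv_equiv track=rewrite | github.com/RohitSignIn/IactClass | String/ValidShuffle.py | validShuffle
-- ===== SOURCE A (Python) =====
-- def validShuffle(concat, shuffle):
--     if(len(concat) != len(shuffle)): return False
--     concatDict = {}
--
--     for i in concat:
--         if(i in concatDict):
--             concatDict[i] += 1
--         else:
--             concatDict[i] = 1
--
--     for i in shuffle:
--         if(i in concatDict and concatDict[i] > 0):
--             concatDict[i] -= 1
--         else:
--             return False
--
--     return True
-- ===== SOURCE B (Python) =====
-- def validShuffle(concat, shuffle):
--     return sorted(concat) == sorted(shuffle)
-- ===== Notes on version B (the rewrite author's own statement) =====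
-- stated objective: simpler
-- what changed: Replaced the frequency-dictionary build pass and the decrement-with-early-return pass by a single sort-and-compare of the two character sequences.
import Mathlib
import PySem

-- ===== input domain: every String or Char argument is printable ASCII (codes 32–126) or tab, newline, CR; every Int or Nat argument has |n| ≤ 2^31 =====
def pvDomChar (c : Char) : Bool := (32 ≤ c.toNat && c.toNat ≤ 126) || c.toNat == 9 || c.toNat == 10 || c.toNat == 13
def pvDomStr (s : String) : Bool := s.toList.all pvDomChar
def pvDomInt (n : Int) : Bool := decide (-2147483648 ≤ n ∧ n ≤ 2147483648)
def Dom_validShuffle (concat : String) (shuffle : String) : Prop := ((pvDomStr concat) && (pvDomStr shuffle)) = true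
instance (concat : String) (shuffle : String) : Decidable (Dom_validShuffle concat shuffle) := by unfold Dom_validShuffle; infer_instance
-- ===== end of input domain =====

-- B replaces A's frequency-dictionary build + decrement passes with a single sort-and-compare of the two character lists (objective: simpler).


-- ===== PORT A =====
-- second loop of A: early 'return False' → structural recursion over the remaining chars
def vsLoop : List Char → PySem.Dict Char Int → Bool
  | [], _ => true
  | i :: rest, d =>
      if d.contains i && decide (0 < d.getD i 0) then
        vsLoop rest (d.insert i (d.getD i 0 - 1))
      else false

def validShuffle (concat : String) (shuffle : String) : Bool :=
  if PySem.Str.len concat ≠ PySem.Str.len shuffle then false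
  else
    let concatDict := concat.toList.foldl
      (fun d i => if d.contains i then d.insert i (d.getD i 0 + 1) else d.insert i 1)
      PySem.Dict.empty
    vsLoop shuffle.toList concatDict

-- ===== PORT B =====
-- B: sorted(concat) == sorted(shuffle)
def validShuffle_alt (concat : String) (shuffle : String) : Bool :=
  decide (PySem.List.sorted concat.toList (fun x => x) false
        = PySem.List.sorted shuffle.toList (fun x => x) false)

-- ===== PRECONDITION & SPEC =====
def Spec_validShuffle (concat : String) (shuffle : String) (out : Bool) : Prop := out = validShuffle_alt concat shuffle
instance (concat : String) (shuffle : String) (out : Bool) : Decidable (Spec_validShuffle concat shuffle out) := by unfold Spec_validShuffle; infer_instance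

-- ===== CLAIM (what is proved, stated in full; the proofs are below) =====
def Claim_equal_validShuffle : Prop := ∀ (concat : String) (shuffle : String), Dom_validShuffle concat shuffle → Spec_validShuffle concat shuffle (validShuffle concat shuffle)

-- ===== LEMMAS AND PROOFS =====

-- the 'i in concatDict' test is redundant alongside 'concatDict[i] > 0' (a missing key reads as the default 0)
lemma vsGuard_eq (d : PySem.Dict Char Int) (i : Char) :
    (d.contains i && decide (0 < d.getD i 0)) = decide (0 < d.getD i 0) := by
  cases h : d.contains i
  · rw [PySem.Dict.getD_of_not_contains d 0 h]; simp
  · simp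

-- A's first loop is Counter(concat): the 'else: d[i] = 1' branch is the same insert with getD = 0
lemma vsBuild_eq_counter (l : List Char) :
    l.foldl (fun d i => if d.contains i then d.insert i (d.getD i 0 + 1) else d.insert i 1)
      PySem.Dict.empty = PySem.Dict.counter l := by
  rw [PySem.List.foldl_congr_mem l _ (fun d i => d.insert i (d.getD i 0 + 1)) _ ?_]
  · exact PySem.Dict.foldl_insert_getD_add_one_eq_counter l
  · intro d i _
    by_cases h : d.contains i = true
    · rw [if_pos h]
    · rw [if_neg h]
      show d.insert i 1 = d.insert i (d.getD i 0 + 1)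
      rw [PySem.Dict.getD_of_not_contains d 0 (by simpa using h)]
      norm_num

-- characterisation of A's second loop: it succeeds iff no character of l is over-demanded
lemma vsLoop_iff (l : List Char) (d : PySem.Dict Char Int) :
    vsLoop l d = true ↔ ∀ v ∈ l, (l.count v : Int) ≤ d.getD v 0 := by
  induction l generalizing d with
  | nil => simp [vsLoop]
  | cons i rest ih =>
    rw [vsLoop, vsGuard_eq]
    by_cases hpos : 0 < d.getD i 0
    · rw [if_pos (by simpa using hpos), ih]
      constructor
      · intro h v hv
        have hc : ((i :: rest).count v : Int)
            = (rest.count v : Int) + (if v = i then 1 else 0) := by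
          rw [List.count_cons]
          by_cases he : v = i
          · simp [he]
          · have he2 : ¬i = v := fun h => he h.symm
            simp [he, he2]
        rcases List.mem_cons.mp hv with rfl | hvr
        · by_cases hir : v ∈ rest
          · have h2 := h v hir
            rw [PySem.Dict.getD_insert, if_pos rfl] at h2
            rw [hc]; simp; omega
          · rw [hc]
            simp [List.count_eq_zero_of_not_mem hir]
            omega
        · have h2 := h v hvr
          rw [PySem.Dict.getD_insert] at h2
          by_cases hvi : v = i
          · subst hvi
            rw [if_pos rfl] at h2
            rw [hc]; simp; omega
          · rw [if_neg hvi] at h2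
            rw [hc, if_neg hvi]
            omega
      · intro h v hvr
        have h2 := h v (List.mem_cons_of_mem _ hvr)
        have hc : ((i :: rest).count v : Int)
            = (rest.count v : Int) + (if v = i then 1 else 0) := by
          rw [List.count_cons]
          by_cases he : v = i
          · simp [he]
          · have he2 : ¬i = v := fun h => he h.symm
            simp [he, he2]
        rw [hc] at h2
        rw [PySem.Dict.getD_insert]
        by_cases hvi : v = i
        · subst hvi
          rw [if_pos rfl] at h2 ⊢
          omega
        · rw [if_neg hvi] at h2
          rw [if_neg hvi]
          omega
    · rw [if_neg (by simpa using hpos)]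
      simp only [Bool.false_eq_true, false_iff]
      intro h
      have h2 := h i (List.mem_cons_self ..)
      have hc : 1 ≤ (i :: rest).count i := by
        simp
      omega

-- ===== VERDICT (by name: the statement is the Claim_ definition above) =====
theorem validShuffle_spec : Claim_equal_validShuffle := by
  intro concat shuffle _
  unfold Spec_validShuffle validShuffle validShuffle_alt
  by_cases hlen : PySem.Str.len concat ≠ PySem.Str.len shuffle
  · rw [if_pos hlen]
    symm
    simp only [decide_eq_false_iff_not]
    intro heq
    apply hlen
    have hp : concat.toList.Perm shuffle.toList :=
      (PySem.List.sorted_id_eq_sorted_id_iff_perm _ _).mp heq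
    rw [PySem.Str.len_eq, PySem.Str.len_eq, hp.length_eq]
  · rw [if_neg hlen]
    rw [not_ne_iff, PySem.Str.len_eq, PySem.Str.len_eq] at hlen
    have hlen' : concat.toList.length = shuffle.toList.length := by omega
    simp only [vsBuild_eq_counter]
    rw [show (vsLoop shuffle.toList (PySem.Dict.counter concat.toList) : Bool)
        = decide (vsLoop shuffle.toList (PySem.Dict.counter concat.toList) = true) by simp]
    rw [decide_eq_decide]
    rw [vsLoop_iff]
    constructor
    · intro h
      have hsp : shuffle.toList.Subperm concat.toList := by
        rw [List.subperm_ext_iff]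
        intro v hv
        have h2 := h v hv
        rw [PySem.Dict.getD_counter] at h2
        exact_mod_cast h2
      have hp := hsp.perm_of_length_le (le_of_eq hlen')
      exact (PySem.List.sorted_id_eq_sorted_id_iff_perm _ _).mpr hp.symm
    · intro heq v hv
      have hp : concat.toList.Perm shuffle.toList :=
        (PySem.List.sorted_id_eq_sorted_id_iff_perm _ _).mp heq
      rw [PySem.Dict.getD_counter, hp.count_eq v]
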